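-- pv_equiv track=rewrite | github.com/Ideadly-Skies/Sty_Stack | Exercises/nesting_scores.py | nesting_score
-- ===== SOURCE A (Python) =====
-- def nesting_score(string):
--     stack = [0]
--
--     for i in range(len(string)):
--         if string[i] == "[":
--             stack.append(0)
--         elif string[i] == "]":
--             popped = stack.pop()
--
--             # if 0 is at the top of the stack
--             if popped == 0:
--                 stack[-1] += 1
--
--             # multiply 2 to the top of the stack
--             if popped > 0:
--                 popped *= 2
--                 stack[-1] += popped
--
--     return stack.pop()
-- ===== SOURCE B (Python) =====
-- def nesting_score(string):
--     # Reverse single pass: each empty group "[]" at pending-depth r contributes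
--     # 2**(r-1); the first unmatched '[' seen from the right ends the scan.
--     acc = 0
--     r = 0
--     after_close = False
--     for c in reversed(string):
--         if c == ']':
--             r += 1
--             after_close = True
--         elif c == '[':
--             if r == 0:
--                 return acc
--             if after_close:
--                 acc += 1 << (r - 1)
--             r -= 1
--             after_close = False
--     return acc
-- ===== Notes on version B (the rewrite author's own statement) =====
-- stated objective: alternative
-- what changed: Replaces the forward pass with a stack of partial scores by a single reverse pass with no stack: each empty group contributes a closed-form weight 2^(pending-depth-1), and the scan stops early at the first unmatched '[' seen from the right (the stack version's final top). Pre_ excludes strings with a ']' at depth 0, on which A raises IndexError.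
import Mathlib
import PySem

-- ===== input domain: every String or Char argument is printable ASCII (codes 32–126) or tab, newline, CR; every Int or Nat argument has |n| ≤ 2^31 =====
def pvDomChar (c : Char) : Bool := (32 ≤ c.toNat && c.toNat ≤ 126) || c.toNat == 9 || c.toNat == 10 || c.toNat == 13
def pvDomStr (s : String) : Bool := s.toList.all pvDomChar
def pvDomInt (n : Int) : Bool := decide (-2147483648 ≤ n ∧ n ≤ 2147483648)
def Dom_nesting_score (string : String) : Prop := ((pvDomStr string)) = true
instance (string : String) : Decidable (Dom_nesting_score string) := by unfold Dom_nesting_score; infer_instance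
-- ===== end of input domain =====

-- B replaces A's forward stack of partial scores by a stackless reverse pass with
-- closed-form weights 2^(pending-depth-1) and an early exit (objective: alternative).

-- ===== PORT A =====
-- one step of A's loop; the stack is kept top-first; `none` = IndexError already raised
def stepA (st : Option (List Int)) (c : Char) : Option (List Int) :=
  match st with
  | none => none
  | some stack =>
    if c = '[' then some (0 :: stack)
    else if c = ']' then
      match stack with
      | popped :: rest =>
        match rest with
        | t :: rs =>
          if popped = 0 then some ((t + 1) :: rs)
          else if popped > 0 then some ((t + popped * 2) :: rs)
          else some (t :: rs)
        | [] => none        -- stack[-1] on empty stack: IndexError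
      | [] => none          -- pop from empty stack: IndexError (unreachable: stack starts nonempty)
    else some stack

def nesting_score (string : String) : Int :=
  match string.toList.foldl stepA (some [0]) with
  | some (t :: _) => t      -- final stack.pop()
  | _ => 0                  -- IndexError was raised; unreachable under Pre_

-- ===== PORT B =====
-- reverse scan: acc = score so far, r = pending unmatched ']', after = last bracket seen was ']'
def goB : List Char → Int → Nat → Bool → Int
  | [], acc, _, _ => acc
  | c :: cs, acc, r, after =>
    if c = ']' then goB cs acc (r + 1) true
    else if c = '[' then
      if r = 0 then acc                             -- unmatched '[': early return
      else goB cs (acc + (if after then (2 : Int) ^ (r - 1) else 0)) (r - 1) false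
    else goB cs acc r after

def nesting_score_alt (string : String) : Int :=
  goB string.toList.reverse 0 0 false

-- ===== PRECONDITION & SPEC =====
-- Pre_ excludes exactly the strings with a ']' closing at depth 0: there A's
-- `stack[-1]` hits an empty stack and raises IndexError.
def Pre_nesting_score (string : String) : Prop :=
  ∀ n < string.toList.length,
    ((string.toList.take (n + 1)).count ']') ≤ ((string.toList.take (n + 1)).count '[')
instance (string : String) : Decidable (Pre_nesting_score string) := by
  unfold Pre_nesting_score; infer_instance

def pvWitness_nesting_score : String := "[[a][]]"

def Spec_nesting_score (string : String) (out : Int) : Prop := out = nesting_score_alt string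
instance (string : String) (out : Int) : Decidable (Spec_nesting_score string out) := by unfold Spec_nesting_score; infer_instance

-- ===== CLAIM (what is proved, stated in full; the proofs are below) =====
def Claim_equal_nesting_score : Prop := ∀ (string : String), Dom_nesting_score string → Pre_nesting_score string → Spec_nesting_score string (nesting_score string)

-- ===== LEMMAS AND PROOFS =====

-- state-threading version of B's scan (inl v = early-returned v)
def bRun : List Char → Int × Nat × Bool → Sum Int (Int × Nat × Bool)
  | [], s => .inr s
  | c :: cs, (acc, r, after) =>
    if c = ']' then bRun cs (acc, r + 1, true)
    else if c = '[' then
      if r = 0 then .inl acc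
      else bRun cs (acc + (if after then (2 : Int) ^ (r - 1) else 0), r - 1, false)
    else bRun cs (acc, r, after)

def bOut : Sum Int (Int × Nat × Bool) → Int
  | .inl v => v
  | .inr (acc, _, _) => acc

lemma goB_eq_bRun (m : List Char) : ∀ acc r after, goB m acc r after = bOut (bRun m (acc, r, after)) := by
  induction m with
  | nil => intro acc r after; rfl
  | cons c cs ih =>
    intro acc r after
    simp only [goB, bRun]
    split_ifs <;> simp [ih, bOut]

lemma bRun_append (xs ys : List Char) : ∀ s, bRun (xs ++ ys) s =
    match bRun xs s with
    | .inl v => .inl v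
    | .inr s' => bRun ys s' := by
  induction xs with
  | nil => intro s; rfl
  | cons c cs ih =>
    rintro ⟨acc, r, after⟩
    simp only [List.cons_append, bRun]
    split_ifs <;> simp [ih]

-- "no ']' ever closes at depth 0 when started from a stack of size k"
def Bal (l : List Char) (k : Nat) : Prop :=
  ∀ n, ((l.take n).count ']') + 1 ≤ k + (l.take n).count '['

-- readout of A's final top from the stack and B's state:
-- the r pending ']' consume the top r levels with weights 2^r … 2, the (r+1)-st level t_r
-- has weight 1, and an empty pending group (after = true, t = 0) adds 2^(r-1).
def stackF : List Int → Nat → Int → Bool → Int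
  | [], _, acc, _ => acc
  | t :: _, 0, acc, _ => acc + t
  | t :: ts, r + 1, acc, after =>
      stackF ts r (acc + 2 ^ (r + 1) * t + (if after ∧ t = 0 then 2 ^ r else 0)) false

lemma stackF_acc_congr (st : List Int) (r : Nat) (f : Bool) {a b : Int} (h : a = b) :
    stackF st r a f = stackF st r b f := by rw [h]

lemma bal_tail (c : Char) (l : List Char) (k : Nat) (h : Bal (c :: l) k) :
    Bal l (if c = '[' then k + 1 else if c = ']' then k - 1 else k) := by
  intro n
  have h1 := h 1
  have hn := h (n + 1)
  simp [List.take_succ_cons, List.count_cons] at h1 hn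
  split_ifs with h1' h2' <;> simp_all <;> omega

lemma bal_close (c : Char) (l : List Char) (k : Nat) (h : Bal (c :: l) k) (hc : c = ']') :
    2 ≤ k := by
  have h1 := h 1
  simp [hc, List.take_succ_cons] at h1
  omega

-- The master invariant: running A on l from a valid nonneg stack st, the final top
-- is B's early return value (inl case) or stackF st r acc after (inr case).

-- closing step: popping t₀ into t₁ equals raising the pending-']' count by one
lemma stackF_close (rest : List Int) (r : Nat) (acc : Int) (after : Bool)
    (t0 t1 : Int) (h0 : 0 ≤ t0) (h1 : 0 ≤ t1) :
    stackF ((if t0 = 0 then t1 + 1 else t1 + t0 * 2) :: rest) r acc after =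
      stackF (t0 :: t1 :: rest) (r + 1) acc true := by
  cases r with
  | zero =>
    by_cases ht : t0 = 0 <;> simp [ht, stackF] <;> ring
  | succ r'' =>
    have hpos : (if t0 = 0 then t1 + 1 else t1 + t0 * 2) ≠ 0 := by
      by_cases ht : t0 = 0 <;> simp [ht] <;> omega
    simp only [stackF, hpos, and_false, if_false, true_and]
    apply stackF_acc_congr
    by_cases ht : t0 = 0 <;> simp [ht, pow_succ] <;> ring

lemma master : ∀ (l : List Char) (st : List Int),
    Bal l st.length → (∀ x ∈ st, 0 ≤ x) → st ≠ [] →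
    (match bRun l.reverse (0, 0, false) with
     | .inl v =>
         ∃ st', l.foldl stepA (some st) = some st' ∧ st' ≠ [] ∧ st'.headD 0 = v
     | .inr (acc, r, after) =>
         (r : Int) = l.count ']' - l.count '[' ∧
         (r + 1 ≤ st.length →
           ∃ st', l.foldl stepA (some st) = some st' ∧ st' ≠ [] ∧
             st'.headD 0 = stackF st r acc after)) := by
  intro l
  induction l with
  | nil =>
    intro st _ _ hne
    rcases st with _ | ⟨t, ts⟩
    · exact absurd rfl hne
    · exact ⟨by simp, fun _ => ⟨t :: ts, by simp [stackF]⟩⟩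
  | cons c cs ih =>
    intro st hbal hnn hne
    have hrev : (c :: cs).reverse = cs.reverse ++ [c] := by simp
    rw [hrev, bRun_append]
    by_cases hc1 : c = '['
    · -- push 0
      subst hc1
      have hstep : stepA (some st) '[' = some (0 :: st) := by simp [stepA]
      have hbal' : Bal cs (0 :: st).length := by
        have := bal_tail '[' cs st.length hbal
        simpa using this
      have hnn' : ∀ x ∈ (0 :: st), (0:Int) ≤ x := by
        intro x hx; rcases List.mem_cons.mp hx with h | h
        · omega
        · exact hnn x h
      have IH := ih (0 :: st) hbal' hnn' (by simp)
      rcases hQ : bRun cs.reverse (0, 0, false) with v | s'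
      · rw [hQ] at IH
        obtain ⟨st', hfold, hne', hhead⟩ := IH
        exact ⟨st', by rw [List.foldl_cons, hstep]; exact hfold, hne', hhead⟩
      · obtain ⟨acc, r, after⟩ := s'
        rw [hQ] at IH
        obtain ⟨hcount, himp⟩ := IH
        cases r with
        | zero =>
          simp only [bRun, if_neg (by decide : ¬('[' = ']'))]
          obtain ⟨st', hfold, hne', hhead⟩ := himp (by simp)
          refine ⟨st', by rw [List.foldl_cons, hstep]; exact hfold, hne', ?_⟩
          simpa [stackF] using hhead
        | succ r' =>
          simp only [bRun, if_neg (by decide : ¬('[' = ']')),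
            Nat.succ_ne_zero, if_false]
          constructor
          · simp only [List.count_cons] at hcount ⊢
            push_cast at hcount ⊢
            simp at hcount ⊢
            omega
          · intro hlen
            obtain ⟨st', hfold, hne', hhead⟩ := himp (by simp; omega)
            refine ⟨st', by rw [List.foldl_cons, hstep]; exact hfold, hne', ?_⟩
            rw [hhead]
            simp only [stackF]
            apply stackF_acc_congr
            simp
    · by_cases hc2 : c = ']'
      · -- pop
        subst hc2
        have hk := bal_close ']' cs st.length hbal rfl
        rcases st with _ | ⟨t0, st1⟩
        · simp at hk
        rcases st1 with _ | ⟨t1, rest⟩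
        · simp at hk
        have h0 : (0:Int) ≤ t0 := hnn t0 (by simp)
        have h1 : (0:Int) ≤ t1 := hnn t1 (by simp)
        have hstep : stepA (some (t0 :: t1 :: rest)) ']' =
            some ((if t0 = 0 then t1 + 1 else t1 + t0 * 2) :: rest) := by
          by_cases ht : t0 = 0
          · simp [stepA, ht]
          · have hpos : t0 > 0 := by omega
            simp [stepA, ht, hpos]
        have hbal' : Bal cs ((if t0 = 0 then t1 + 1 else t1 + t0 * 2) :: rest).length := by
          have := bal_tail ']' cs (t0 :: t1 :: rest).length hbal
          simp only [if_neg (by decide : ¬(']' = '['))] at this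
          simpa using this
        have hnn' : ∀ x ∈ ((if t0 = 0 then t1 + 1 else t1 + t0 * 2) :: rest), (0:Int) ≤ x := by
          intro x hx; rcases List.mem_cons.mp hx with h | h
          · subst h; by_cases ht : t0 = 0 <;> simp [ht] <;> omega
          · exact hnn x (by simp [h])
        have IH := ih _ hbal' hnn' (by simp)
        rcases hQ : bRun cs.reverse (0, 0, false) with v | s'
        · rw [hQ] at IH
          obtain ⟨st', hfold, hne', hhead⟩ := IH
          exact ⟨st', by rw [List.foldl_cons, hstep]; exact hfold, hne', hhead⟩
        · obtain ⟨acc, r, after⟩ := s'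
          rw [hQ] at IH
          obtain ⟨hcount, himp⟩ := IH
          simp only [bRun]
          constructor
          · simp only [List.count_cons] at hcount ⊢
            push_cast at hcount ⊢
            simp at hcount ⊢
            omega
          · intro hlen
            obtain ⟨st', hfold, hne', hhead⟩ := himp (by simp at hlen ⊢; omega)
            refine ⟨st', by rw [List.foldl_cons, hstep]; exact hfold, hne', ?_⟩
            rw [hhead, stackF_close rest r acc after t0 t1 h0 h1]
      · -- non-bracket: nothing changes
        have hstep : stepA (some st) c = some st := by simp [stepA, hc1, hc2]
        have hbal' : Bal cs st.length := by
          have := bal_tail c cs st.length hbal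
          simpa [hc1, hc2] using this
        have IH := ih st hbal' hnn hne
        rcases hQ : bRun cs.reverse (0, 0, false) with v | s'
        · rw [hQ] at IH
          obtain ⟨st', hfold, hne', hhead⟩ := IH
          exact ⟨st', by rw [List.foldl_cons, hstep]; exact hfold, hne', hhead⟩
        · obtain ⟨acc, r, after⟩ := s'
          rw [hQ] at IH
          obtain ⟨hcount, himp⟩ := IH
          simp only [bRun, if_neg hc2, if_neg hc1]
          constructor
          · simp only [List.count_cons] at hcount ⊢
            simp [hc1, hc2] at hcount ⊢
            exact hcount
          · intro hlen
            obtain ⟨st', hfold, hne', hhead⟩ := himp hlen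
            exact ⟨st', by rw [List.foldl_cons, hstep]; exact hfold, hne', hhead⟩

lemma pre_count (l : List Char)
    (hpre : ∀ n < l.length, ((l.take (n+1)).count ']') ≤ ((l.take (n+1)).count '[')) :
    ∀ n, ((l.take n).count ']') ≤ ((l.take n).count '[') := by
  intro n
  cases n with
  | zero => simp
  | succ m =>
    by_cases hm : m < l.length
    · exact hpre m hm
    · have hlen : l.length ≤ m + 1 := by omega
      rw [List.take_of_length_le hlen]
      cases hz : l.length with
      | zero =>
        have : l = [] := List.length_eq_zero_iff.mp hz
        simp [this]
      | succ k =>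
        have h := hpre k (by omega)
        have hk1 : k + 1 = l.length := by omega
        rw [hk1, List.take_length] at h
        exact h

-- ===== VERDICT (by name: the statement is the Claim_ definition above) =====
theorem nesting_score_spec : Claim_equal_nesting_score := by
  intro s _ hpre
  unfold Spec_nesting_score
  have hcnt := pre_count s.toList hpre
  have hbal : Bal s.toList 1 := by
    intro n; have := hcnt n; omega
  have hM := master s.toList [0] (by simpa using hbal) (by simp) (by simp)
  unfold nesting_score_alt
  rw [goB_eq_bRun]
  rcases hQ : bRun s.toList.reverse (0, 0, false) with v | s'
  · rw [hQ] at hM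
    obtain ⟨st', hfold, hne', hhead⟩ := hM
    rcases st' with _ | ⟨t, ts⟩
    · exact absurd rfl hne'
    · simp only [List.headD] at hhead
      simp [nesting_score, hfold, bOut, hhead]
  · obtain ⟨acc, r, after⟩ := s'
    rw [hQ] at hM
    obtain ⟨hcount, himp⟩ := hM
    have hr : r = 0 := by
      have hle := hcnt s.toList.length
      rw [List.take_length] at hle
      omega
    subst hr
    obtain ⟨st', hfold, hne', hhead⟩ := himp (by simp)
    rcases st' with _ | ⟨t, ts⟩
    · exact absurd rfl hne'
    · simp only [List.headD, stackF] at hhead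
      simp [nesting_score, hfold, bOut, hhead]
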